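-- pv_equiv track=rewrite | github.com/Vijay2101/GenAI-Assessment-Recommender | scripts/testing/test2.py | rank_and_balance
-- ===== SOURCE A (Python) =====
-- from typing import List, Optional
--
-- def rank_and_balance(
--     candidates,
--     required_test_types: List[str],
--     final_k: int = 10
-- ):
--     if not required_test_types:
--         return candidates[:final_k]
--
--     buckets = {t: [] for t in required_test_types}
--
--     for c in candidates:
--         for t in required_test_types:
--             if t in c.get("test_types", []):
--                 buckets[t].append(c)
--
--     results = []
--     while len(results) < final_k:
--         progress = False
--         for t in required_test_types:
--             if buckets[t]:
--                 results.append(buckets[t].pop(0))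
--                 progress = True
--             if len(results) >= final_k:
--                 break
--         if not progress:
--             break
--
--     return results
-- ===== SOURCE B (Python) =====
-- def rank_and_balance(candidates, required_test_types, final_k=10):
--     if not required_test_types:
--         return candidates[:final_k]
--     if final_k <= 0:
--         return []
--     buckets = {t: [c for c in candidates if t in c.get("test_types", [])]
--                for t in required_test_types}
--     rounds = max(len(buckets[t]) for t in required_test_types)
--     full = [buckets[t][r]
--             for r in range(rounds)
--             for t in required_test_types
--             if r < len(buckets[t])]
--     return full[:final_k]
-- ===== Notes on version B (the rewrite author's own statement) =====
-- stated objective: alternative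
-- what changed: B replaces A's destructive pop(0)-based while/progress drain over mutable buckets with a non-mutating round-robin interleave computed by index (row r takes buckets[t][r] for each required-type occurrence) followed by a single prefix slice, exploiting that A's per-occurrence appends and per-occurrence pops cancel out.
import Mathlib
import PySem

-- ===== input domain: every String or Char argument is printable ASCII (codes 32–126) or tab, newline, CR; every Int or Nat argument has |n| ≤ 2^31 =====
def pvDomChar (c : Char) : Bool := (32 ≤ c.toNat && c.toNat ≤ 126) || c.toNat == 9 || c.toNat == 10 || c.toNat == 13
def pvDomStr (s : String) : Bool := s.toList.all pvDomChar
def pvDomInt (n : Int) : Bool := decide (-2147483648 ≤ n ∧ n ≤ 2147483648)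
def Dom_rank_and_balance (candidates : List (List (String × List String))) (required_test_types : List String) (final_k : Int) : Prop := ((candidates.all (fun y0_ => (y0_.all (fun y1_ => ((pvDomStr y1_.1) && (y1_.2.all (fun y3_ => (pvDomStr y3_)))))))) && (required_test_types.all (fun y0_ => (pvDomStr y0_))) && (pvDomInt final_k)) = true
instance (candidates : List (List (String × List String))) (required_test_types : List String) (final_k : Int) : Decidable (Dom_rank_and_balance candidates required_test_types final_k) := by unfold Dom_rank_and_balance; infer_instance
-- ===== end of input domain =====

-- B replaces A's destructive pop(0) while/progress drain with a non-mutating round-robin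
-- interleave by index (row r takes buckets[t][r] for each required type), then slices
-- the first final_k; objective: alternative (same cost, no mutable bucket state).

-- c.get("test_types", []) — shared dict-lookup primitive (a candidate is a Python dict)
def pvGetTT (c : List (String × List String)) : List String :=
  PySem.Dict.getD (PySem.Dict.mk c) "test_types" []

-- ===== PORT A =====
-- buckets = {t: [] for t in required_test_types}
def pvInitBuckets (ts : List String) : PySem.Dict String (List (List (String × List String))) :=
  ts.foldl (fun b t => b.insert t []) PySem.Dict.empty

-- for c in candidates: for t in required_test_types: if t in c.get("test_types", []): buckets[t].append(c)
def pvFill (cands : List (List (String × List String))) (ts : List String)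
    (b : PySem.Dict String (List (List (String × List String)))) :
    PySem.Dict String (List (List (String × List String))) :=
  cands.foldl (fun b c =>
    ts.foldl (fun b t =>
      if (pvGetTT c).contains t then b.modify t [] (fun l => l ++ [c]) else b) b) b

-- one pass of 'for t in required_test_types: …' with both break checks
def pvRoundA (k : Int) :
    List String → PySem.Dict String (List (List (String × List String))) →
    List (List (String × List String)) → Bool →
    PySem.Dict String (List (List (String × List String))) × List (List (String × List String)) × Bool
  | [], b, res, prog => (b, res, prog)
  | t :: ts, b, res, prog =>
    match b.getD t [] with
    | [] => if k ≤ (res.length : Int) then (b, res, prog) else pvRoundA k ts b res prog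
    | x :: _ =>
      let b' := b.modify t [] (fun l => l.drop 1)      -- buckets[t].pop(0)
      let res' := res ++ [x]
      if k ≤ (res'.length : Int) then (b', res', true) else pvRoundA k ts b' res' true

-- while len(results) < final_k: … (fuel bounds the number of iterations; each
-- productive round removes at least one bucket element, so the fuel chosen below suffices)
def pvDrainA (k : Int) (req : List String) :
    Nat → PySem.Dict String (List (List (String × List String))) →
    List (List (String × List String)) → List (List (String × List String))
  | 0, _, res => res
  | fuel+1, b, res =>
    if (res.length : Int) < k then
      let r := pvRoundA k req b res false
      if r.2.2 then pvDrainA k req fuel r.1 r.2.1 else r.2.1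
    else res

def rank_and_balance (candidates : List (List (String × List String))) (required_test_types : List String) (final_k : Int) : List (List (String × List String)) :=
  if required_test_types = [] then PySem.List.slice candidates none (some final_k)
  else
    pvDrainA final_k required_test_types (candidates.length * required_test_types.length + 1)
      (pvFill candidates required_test_types (pvInitBuckets required_test_types)) []

-- ===== PORT B =====
-- buckets = {t: [c for c in candidates if t in c.get("test_types", [])] for t in required_test_types}
def pvBucketsB (cands : List (List (String × List String))) (ts : List String) :
    PySem.Dict String (List (List (String × List String))) :=
  ts.foldl (fun b t => b.insert t (cands.filter (fun c => (pvGetTT c).contains t))) PySem.Dict.empty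

def rank_and_balance_alt (candidates : List (List (String × List String))) (required_test_types : List String) (final_k : Int) : List (List (String × List String)) :=
  if required_test_types = [] then PySem.List.slice candidates none (some final_k)
  else if final_k ≤ 0 then []
  else
    let buckets := pvBucketsB candidates required_test_types
    -- rounds = max(len(buckets[t]) for t in required_test_types)  (nonempty generator)
    let rounds := required_test_types.foldl (fun m t => max m (buckets.getD t []).length) 0
    let full := (List.range rounds).flatMap (fun r =>
      required_test_types.filterMap (fun t => (buckets.getD t [])[r]?))
    PySem.List.slice full none (some final_k)

-- ===== PRECONDITION & SPEC =====
def Spec_rank_and_balance (candidates : List (List (String × List String))) (required_test_types : List String) (final_k : Int) (out : List (List (String × List String))) : Prop := out = rank_and_balance_alt candidates required_test_types final_k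
instance (candidates : List (List (String × List String))) (required_test_types : List String) (final_k : Int) (out : List (List (String × List String))) : Decidable (Spec_rank_and_balance candidates required_test_types final_k out) := by unfold Spec_rank_and_balance; infer_instance

-- ===== CLAIM (what is proved, stated in full; the proofs are below) =====
def Claim_equal_rank_and_balance : Prop := ∀ (candidates : List (List (String × List String))) (required_test_types : List String) (final_k : Int), Dom_rank_and_balance candidates required_test_types final_k → Spec_rank_and_balance candidates required_test_types final_k (rank_and_balance candidates required_test_types final_k)


-- ===== LEMMAS AND PROOFS =====

-- the bucket list B computes for a type
def pvMatch (cands : List (List (String × List String))) (t : String) : List (List (String × List String)) :=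
  cands.filter (fun c => (pvGetTT c).contains t)

-- each element repeated n times (A's fill appends a candidate once per duplicate occurrence of t)
def pvRep (n : Nat) (l : List (List (String × List String))) : List (List (String × List String)) :=
  l.flatMap (fun c => List.replicate n c)

-- one round of A's drain with no length limit: pop the head of each bucket in required order
def pvRoundE : List String → PySem.Dict String (List (List (String × List String))) →
    List (List (String × List String)) × PySem.Dict String (List (List (String × List String)))
  | [], b => ([], b)
  | t :: ts, b =>
    match b.getD t [] with
    | [] => pvRoundE ts b
    | x :: _ => let p := pvRoundE ts (b.modify t [] (fun l => l.drop 1)); (x :: p.1, p.2)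

-- the full (unlimited) drain sequence of A, rounds until an empty round
def pvG (req : List String) : Nat → PySem.Dict String (List (List (String × List String))) →
    List (List (String × List String))
  | 0, _ => []
  | fuel+1, b => let p := pvRoundE req b; if p.1 = [] then [] else p.1 ++ pvG req fuel p.2

-- the same drain on pure bucket functions
def pvGpure (req : List String) : Nat → (String → List (List (String × List String))) →
    List (List (String × List String))
  | 0, _ => []
  | fuel+1, f =>
    let l := req.filterMap (fun t => (f t).head?)
    if l = [] then [] else l ++ pvGpure req fuel (fun t => (f t).drop 1)

def pvRlen (req : List String) (f : String → List (List (String × List String))) : Nat :=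
  req.foldl (fun m t => max m (f t).length) 0

theorem pv_fill_inner (c : List (String × List String)) (ts : List String)
    (b : PySem.Dict String (List (List (String × List String)))) (t : String) :
    (ts.foldl (fun b t => if (pvGetTT c).contains t then b.modify t [] (fun l => l ++ [c]) else b) b).getD t []
      = b.getD t [] ++ (if (pvGetTT c).contains t then List.replicate (ts.count t) c else []) := by
  induction ts generalizing b with
  | nil => simp
  | cons t' ts ih =>
    simp only [List.foldl_cons]
    by_cases hp : (pvGetTT c).contains t'
    · have hp' : t' ∈ pvGetTT c := by simpa using hp
      rw [if_pos hp, ih, PySem.Dict.getD_modify]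
      by_cases he : t = t'
      · simp [he, hp', List.replicate_succ, List.append_assoc]
      · simp [he, Ne.symm he]
    · have hp' : t' ∉ pvGetTT c := by simpa using hp
      rw [if_neg hp, ih]
      by_cases he : t = t'
      · simp [he, hp']
      · simp [he, Ne.symm he]

theorem pv_getD_fill (cands : List (List (String × List String))) (ts : List String)
    (b : PySem.Dict String (List (List (String × List String)))) (t : String) :
    (pvFill cands ts b).getD t [] = b.getD t [] ++ pvRep (ts.count t) (pvMatch cands t) := by
  induction cands generalizing b with
  | nil => simp [pvFill, pvRep, pvMatch]
  | cons c cs ih =>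
    have h1 : pvFill (c :: cs) ts b
        = pvFill cs ts (ts.foldl (fun b t =>
            if (pvGetTT c).contains t then b.modify t [] (fun l => l ++ [c]) else b) b) := rfl
    rw [h1, ih, pv_fill_inner]
    by_cases hp : t ∈ pvGetTT c
    · simp [pvMatch, pvRep, hp, List.append_assoc]
    · simp [pvMatch, pvRep, hp]

theorem pv_getD_init (ts : List String) (t : String) :
    (pvInitBuckets ts).getD t [] = [] := by
  have h : ∀ (ts : List String) (b : PySem.Dict String (List (List (String × List String)))),
      (∀ u, b.getD u [] = []) → ∀ u, (ts.foldl (fun b t => b.insert t []) b).getD u [] = [] := by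
    intro ts
    induction ts with
    | nil => intro b hb u; simpa using hb u
    | cons t' ts ih =>
      intro b hb u
      simp only [List.foldl_cons]
      refine ih _ (fun v => ?_) u
      rw [PySem.Dict.getD_insert]
      split <;> simp [hb]
  exact h ts _ (fun u => by simp) t

theorem pv_getD_bucketsB (cands : List (List (String × List String))) (ts : List String)
    (t : String) (ht : t ∈ ts) :
    (pvBucketsB cands ts).getD t [] = pvMatch cands t := by
  have haux : ∀ (g : String → List (List (String × List String))) (ts : List String)
      (b : PySem.Dict String (List (List (String × List String)))) (t : String), t ∉ ts →
      (ts.foldl (fun b t => b.insert t (g t)) b).getD t [] = b.getD t [] := by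
    intro g ts
    induction ts with
    | nil => intro b t _; rfl
    | cons t' ts ih =>
      intro b t ht
      simp only [List.foldl_cons]
      have hne : ¬ t = t' := fun h => ht (by rw [h]; exact List.mem_cons_self)
      rw [ih _ _ (fun h => ht (List.mem_cons_of_mem _ h)), PySem.Dict.getD_insert, if_neg hne]
  have hmem : ∀ (g : String → List (List (String × List String))) (ts : List String)
      (b : PySem.Dict String (List (List (String × List String)))) (t : String), t ∈ ts →
      (ts.foldl (fun b t => b.insert t (g t)) b).getD t [] = g t := by
    intro g ts
    induction ts with
    | nil => intro b t ht; cases ht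
    | cons t' ts ih =>
      intro b t ht
      simp only [List.foldl_cons]
      by_cases h2 : t ∈ ts
      · exact ih _ _ h2
      · have he : t = t' := by
          rcases List.mem_cons.mp ht with h | h
          · exact h
          · exact absurd h h2
        subst he
        rw [haux _ _ _ _ h2, PySem.Dict.getD_insert, if_pos rfl]
  exact hmem (fun u => cands.filter (fun c => (pvGetTT c).contains u)) ts PySem.Dict.empty t ht

theorem pv_rep_drop (n : Nat) (l : List (List (String × List String))) :
    (pvRep n l).drop n = pvRep n (l.drop 1) := by
  cases l with
  | nil => simp [pvRep]
  | cons c cs =>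
    simp only [pvRep, List.flatMap_cons, List.drop_one, List.tail_cons]
    rw [List.drop_append_of_le_length (by simp), List.drop_replicate]
    simp

theorem pv_rep_len (n : Nat) (l : List (List (String × List String))) :
    (pvRep n l).length = l.length * n := by
  induction l with
  | nil => simp [pvRep]
  | cons c cs ih =>
    simp only [pvRep, List.flatMap_cons, List.length_append, List.length_replicate, List.length_cons] at *
    rw [ih]
    ring

theorem pv_roundE_spec (req : List String) (f : String → List (List (String × List String))) :
    ∀ (ts : List String) (b : PySem.Dict String (List (List (String × List String)))),
    (∀ t, ts.count t ≤ req.count t) →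
    (∀ t, b.getD t [] = (pvRep (req.count t) (f t)).drop (req.count t - ts.count t)) →
    (pvRoundE ts b).1 = ts.filterMap (fun t => (f t).head?) ∧
    (∀ t, (pvRoundE ts b).2.getD t [] = (pvRep (req.count t) (f t)).drop (req.count t)) := by
  intro ts
  induction ts with
  | nil =>
    intro b _ hinv
    refine ⟨rfl, fun t => ?_⟩
    simpa using hinv t
  | cons t' ts ih =>
    intro b hc hinv
    have hcount' : ∀ t, ts.count t ≤ req.count t := by
      intro t
      refine le_trans ?_ (hc t)
      rw [List.count_cons]; split <;> omega
    have hcc : (t' :: ts).count t' = ts.count t' + 1 := by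
      simp
    have hcnt' : ts.count t' + 1 ≤ req.count t' := by
      have h := hc t'
      rw [hcc] at h
      exact h
    cases hb : b.getD t' [] with
    | nil =>
      have hft' : f t' = [] := by
        cases hf : f t' with
        | nil => rfl
        | cons c cs =>
          exfalso
          have h0 := hinv t'
          rw [hb, hf, hcc] at h0
          have hlen : (pvRep (req.count t') (c :: cs)).length ≤ req.count t' - (ts.count t' + 1) :=
            List.drop_eq_nil_iff.mp h0.symm
          rw [pv_rep_len, List.length_cons] at hlen
          have h2 : req.count t' ≤ (cs.length + 1) * req.count t' :=
            Nat.le_mul_of_pos_left _ (Nat.succ_pos _)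
          omega
      have hstep : pvRoundE (t' :: ts) b = pvRoundE ts b := by
        simp [pvRoundE, hb]
      rw [hstep]
      have hinv' : ∀ t, b.getD t [] = (pvRep (req.count t) (f t)).drop (req.count t - ts.count t) := by
        intro t
        by_cases he : t = t'
        · subst he
          rw [hb, hft']
          simp [pvRep]
        · have h0 := hinv t
          simp only [List.count_cons, beq_iff_eq] at h0
          rw [if_neg (Ne.symm he)] at h0
          simpa using h0
      obtain ⟨h1, h2⟩ := ih b hcount' hinv'
      refine ⟨?_, h2⟩
      rw [h1]
      simp [hft']
    | cons x rest =>
      have h0 := hinv t'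
      rw [hb, hcc] at h0
      cases hf : f t' with
      | nil => rw [hf] at h0; simp [pvRep] at h0
      | cons c cs =>
        rw [hf] at h0
        have hrep : pvRep (req.count t') (c :: cs)
            = List.replicate (req.count t') c ++ pvRep (req.count t') cs := by
          simp [pvRep]
        rw [hrep, List.drop_append_of_le_length (by simp), List.drop_replicate] at h0
        obtain ⟨m, hm⟩ : ∃ m, req.count t' - (req.count t' - (ts.count t' + 1)) = m + 1 :=
          ⟨req.count t' - (req.count t' - (ts.count t' + 1)) - 1, by omega⟩
        rw [hm, List.replicate_succ] at h0
        injection h0 with hx hrest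
        have hstep : pvRoundE (t' :: ts) b
            = (x :: (pvRoundE ts (b.modify t' [] (fun l => l.drop 1))).1,
               (pvRoundE ts (b.modify t' [] (fun l => l.drop 1))).2) := by
          simp [pvRoundE, hb]
        set b2 := b.modify t' [] (fun l => l.drop 1) with hb2
        have hinv' : ∀ t, b2.getD t [] = (pvRep (req.count t) (f t)).drop (req.count t - ts.count t) := by
          intro t
          rw [hb2, PySem.Dict.getD_modify]
          by_cases he : t = t'
          · rw [if_pos he, hb, he]
            show rest = _
            rw [hf, hrep, List.drop_append_of_le_length (by simp), List.drop_replicate, hrest]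
            have hmm : m = req.count t' - (req.count t' - ts.count t') := by omega
            rw [hmm]
            rfl
          · rw [if_neg he]
            have h1 := hinv t
            simp only [List.count_cons, beq_iff_eq] at h1
            rw [if_neg (Ne.symm he)] at h1
            simpa using h1
        obtain ⟨ih1, ih2⟩ := ih b2 hcount' hinv'
        rw [hstep]
        refine ⟨?_, ih2⟩
        simp only [ih1]
        simp [hf, hx]

theorem pv_G_pure (req : List String) :
    ∀ (fuel : Nat) (f : String → List (List (String × List String)))
      (b : PySem.Dict String (List (List (String × List String)))),
    (∀ t, b.getD t [] = pvRep (req.count t) (f t)) →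
    pvG req fuel b = pvGpure req fuel f := by
  intro fuel
  induction fuel with
  | zero => intro f b _; rfl
  | succ n ih =>
    intro f b hb
    have hinv : ∀ t, b.getD t [] = (pvRep (req.count t) (f t)).drop (req.count t - req.count t) := by
      intro t; simpa using hb t
    obtain ⟨h1, h2⟩ := pv_roundE_spec req f req b (fun t => le_refl _) hinv
    show (if (pvRoundE req b).1 = [] then [] else (pvRoundE req b).1 ++ pvG req n (pvRoundE req b).2)
        = (if req.filterMap (fun t => (f t).head?) = [] then []
           else req.filterMap (fun t => (f t).head?) ++ pvGpure req n (fun t => (f t).drop 1))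
    rw [h1]
    by_cases hl : req.filterMap (fun t => (f t).head?) = []
    · simp [hl]
    · rw [if_neg hl, if_neg hl]
      congr 1
      apply ih
      intro t
      rw [h2 t, pv_rep_drop]

theorem pv_round_lt (k : Int) :
    ∀ (ts : List String) (b : PySem.Dict String (List (List (String × List String))))
      (res : List (List (String × List String))) (prog : Bool),
    ((res.length + (pvRoundE ts b).1.length : Nat) : Int) < k →
    pvRoundA k ts b res prog
      = ((pvRoundE ts b).2, res ++ (pvRoundE ts b).1, prog || !(pvRoundE ts b).1.isEmpty) := by
  intro ts
  induction ts with
  | nil =>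
    intro b res prog h
    simp [pvRoundA, pvRoundE]
  | cons t' ts ih =>
    intro b res prog h
    cases hb : b.getD t' [] with
    | nil =>
      have hstep : pvRoundE (t' :: ts) b = pvRoundE ts b := by simp [pvRoundE, hb]
      rw [hstep] at h ⊢
      have hlt : ¬ (k ≤ (res.length : Int)) := by push_cast at h; omega
      simp only [pvRoundA, hb]
      rw [if_neg hlt]
      exact ih b res prog h
    | cons x rest =>
      have hstep1 : (pvRoundE (t' :: ts) b).1
          = x :: (pvRoundE ts (b.modify t' [] (fun l => l.drop 1))).1 := by
        simp [pvRoundE, hb]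
      have hstep2 : (pvRoundE (t' :: ts) b).2
          = (pvRoundE ts (b.modify t' [] (fun l => l.drop 1))).2 := by
        simp [pvRoundE, hb]
      set b2 := b.modify t' [] (fun l => l.drop 1) with hb2
      rw [hstep1] at h
      have hlt : ¬ (k ≤ ((res ++ [x]).length : Int)) := by
        push_cast at h ⊢; simp at h ⊢; omega
      have h' : (((res ++ [x]).length + (pvRoundE ts b2).1.length : Nat) : Int) < k := by
        push_cast at h ⊢; simp at h ⊢; omega
      simp only [pvRoundA, hb]
      rw [if_neg hlt, ih b2 (res ++ [x]) true h']
      rw [hstep1, hstep2]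
      simp

theorem pv_round_ge (k : Int) :
    ∀ (ts : List String) (b : PySem.Dict String (List (List (String × List String))))
      (res : List (List (String × List String))) (prog : Bool),
    ((res.length : Nat) : Int) < k →
    k ≤ ((res.length + (pvRoundE ts b).1.length : Nat) : Int) →
    (pvRoundA k ts b res prog).2.1 = res ++ (pvRoundE ts b).1.take ((k - (res.length : Int)).toNat) ∧
    (pvRoundA k ts b res prog).2.2 = true := by
  intro ts
  induction ts with
  | nil =>
    intro b res prog hlt hge
    exfalso
    simp [pvRoundE] at hge
    omega
  | cons t' ts ih =>
    intro b res prog hlt hge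
    cases hb : b.getD t' [] with
    | nil =>
      have hstep : pvRoundE (t' :: ts) b = pvRoundE ts b := by simp [pvRoundE, hb]
      rw [hstep] at hge ⊢
      simp only [pvRoundA, hb]
      rw [if_neg (not_le.mpr hlt)]
      exact ih b res prog hlt hge
    | cons x rest =>
      have hstep1 : (pvRoundE (t' :: ts) b).1
          = x :: (pvRoundE ts (b.modify t' [] (fun l => l.drop 1))).1 := by
        simp [pvRoundE, hb]
      set b2 := b.modify t' [] (fun l => l.drop 1) with hb2
      rw [hstep1] at hge ⊢
      by_cases hstop : k ≤ ((res ++ [x]).length : Int)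
      · simp only [pvRoundA, hb]
        rw [if_pos hstop]
        have hm : (k - (res.length : Int)).toNat = 1 := by
          push_cast at hstop; simp at hstop; omega
        rw [hm]
        simp
      · simp only [pvRoundA, hb]
        rw [if_neg hstop]
        have hlt' : ((res ++ [x]).length : Int) < k := not_le.mp hstop
        have hge' : k ≤ (((res ++ [x]).length + (pvRoundE ts b2).1.length : Nat) : Int) := by
          push_cast at hge ⊢; simp at hge ⊢; omega
        obtain ⟨e1, e2⟩ := ih b2 (res ++ [x]) true hlt' hge'
        refine ⟨?_, e2⟩
        rw [e1]
        have hm : (k - (res.length : Int)).toNat = ((k - (((res ++ [x]).length : Nat) : Int)).toNat) + 1 := by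
          push_cast at hstop ⊢; simp at hstop ⊢; omega
        rw [hm, List.take_succ_cons]
        simp

theorem pv_take_append {α : Type} (n : Nat) (l1 l2 : List α) :
    (l1 ++ l2).take n = l1.take n ++ l2.take (n - l1.length) := by
  induction l1 generalizing n with
  | nil => simp
  | cons a l ih =>
    cases n with
    | zero => simp
    | succ n => simp [List.take_succ_cons, ih]

theorem pv_drain_stop (k : Int) (req : List String) (fuel : Nat)
    (b : PySem.Dict String (List (List (String × List String))))
    (res : List (List (String × List String))) (h : ¬ ((res.length : Int) < k)) :
    pvDrainA k req fuel b res = res := by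
  cases fuel <;> simp [pvDrainA, h]

theorem pv_drain_take (k : Int) (req : List String) :
    ∀ (fuel : Nat) (b : PySem.Dict String (List (List (String × List String))))
      (res : List (List (String × List String))),
    ((res.length : Int) < k) →
    pvDrainA k req fuel b res = res ++ (pvG req fuel b).take ((k - (res.length : Int)).toNat) := by
  intro fuel
  induction fuel with
  | zero => intro b res h; simp [pvDrainA, pvG]
  | succ n ih =>
    intro b res hres
    have hG : pvG req (n+1) b
        = (if (pvRoundE req b).1 = [] then []
           else (pvRoundE req b).1 ++ pvG req n (pvRoundE req b).2) := rfl
    show (if (res.length : Int) < k then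
            if (pvRoundA k req b res false).2.2 then
              pvDrainA k req n (pvRoundA k req b res false).1 (pvRoundA k req b res false).2.1
            else (pvRoundA k req b res false).2.1
          else res)
        = res ++ (pvG req (n+1) b).take ((k - (res.length : Int)).toNat)
    rw [if_pos hres, hG]
    by_cases hcase : ((res.length + (pvRoundE req b).1.length : Nat) : Int) < k
    · rw [pv_round_lt k req b res false hcase]
      cases hl : (pvRoundE req b).1 with
      | nil => simp
      | cons y ys =>
        rw [hl] at hcase
        have hres' : (((res ++ y :: ys).length : Nat) : Int) < k := by
          push_cast at hcase ⊢; simp at hcase ⊢; omega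
        show pvDrainA k req n (pvRoundE req b).2 (res ++ y :: ys)
            = res ++ List.take (k - (res.length : Int)).toNat (y :: ys ++ pvG req n (pvRoundE req b).2)
        rw [ih _ _ hres']
        have hlen : (y :: ys).length ≤ (k - (res.length : Int)).toNat := by
          push_cast at hcase; simp at hcase ⊢; omega
        rw [pv_take_append _ _ _, List.take_of_length_le hlen]
        have hm : (k - (((res ++ y :: ys).length : Nat) : Int)).toNat
            = (k - (res.length : Int)).toNat - (y :: ys).length := by
          push_cast; simp; omega
        rw [hm]
        simp [List.append_assoc]
    · have hge : k ≤ ((res.length + (pvRoundE req b).1.length : Nat) : Int) := not_lt.mp hcase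
      obtain ⟨e1, e2⟩ := pv_round_ge k req b res false hres hge
      rw [e2, if_pos rfl, e1]
      have hmle : (k - (res.length : Int)).toNat ≤ (pvRoundE req b).1.length := by
        push_cast at hge; omega
      have hm1 : 1 ≤ (k - (res.length : Int)).toNat := by omega
      rw [pv_drain_stop _ _ _ _ _ (by
        simp only [List.length_append, List.length_take]
        push_cast
        omega)]
      have hlne : (pvRoundE req b).1 ≠ [] := by
        intro h0
        rw [h0] at hmle
        simp at hmle
        omega
      rw [if_neg hlne, pv_take_append _ _ _]
      have h0 : (k - (res.length : Int)).toNat - (pvRoundE req b).1.length = 0 := by omega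
      rw [h0]
      simp

theorem pv_rlen_drop (req : List String) (f : String → List (List (String × List String))) :
    pvRlen req (fun t => (f t).drop 1) = pvRlen req f - 1 := by
  have aux : ∀ (ts : List String) (a : Nat),
      ts.foldl (fun m t => max m ((f t).drop 1).length) (a - 1)
        = (ts.foldl (fun m t => max m (f t).length) a) - 1 := by
    intro ts
    induction ts with
    | nil => intro a; rfl
    | cons t' ts ih =>
      intro a
      simp only [List.foldl_cons]
      rw [← ih (max a (f t').length)]
      congr 1
      rw [List.length_drop]
      omega
  simpa [pvRlen] using aux req 0

theorem pv_le_rlen (req : List String) (f : String → List (List (String × List String)))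
    (t : String) (ht : t ∈ req) : (f t).length ≤ pvRlen req f := by
  have hmono : ∀ (ts : List String) (a : Nat), a ≤ ts.foldl (fun m t => max m (f t).length) a := by
    intro ts
    induction ts with
    | nil => intro a; exact le_refl a
    | cons t' ts ih => intro a; exact le_trans (Nat.le_max_left _ _) (ih _)
  have hmem : ∀ (ts : List String) (a : Nat), t ∈ ts →
      (f t).length ≤ ts.foldl (fun m t => max m (f t).length) a := by
    intro ts
    induction ts with
    | nil => intro a h; cases h
    | cons t' ts ih =>
      intro a h
      rcases List.mem_cons.mp h with h | h
      · rw [h]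
        exact le_trans (Nat.le_max_right _ _) (hmono ts _)
      · exact ih _ h
  exact hmem req 0 ht

theorem pv_rlen_le (req : List String) (f : String → List (List (String × List String)))
    (n : Nat) (h : ∀ t ∈ req, (f t).length ≤ n) : pvRlen req f ≤ n := by
  have aux : ∀ (ts : List String) (a : Nat), a ≤ n → (∀ t ∈ ts, (f t).length ≤ n) →
      ts.foldl (fun m t => max m (f t).length) a ≤ n := by
    intro ts
    induction ts with
    | nil => intro a ha _; exact ha
    | cons t' ts ih =>
      intro a ha hts
      refine ih _ ?_ (fun u hu => hts u (List.mem_cons_of_mem _ hu))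
      exact max_le ha (hts t' List.mem_cons_self)
  exact aux req 0 (Nat.zero_le n) h

theorem pv_filterMap_congr {α β : Type} (l : List α) (f g : α → Option β)
    (h : ∀ x ∈ l, f x = g x) : l.filterMap f = l.filterMap g := by
  induction l with
  | nil => rfl
  | cons a l ih =>
    have ha := h a List.mem_cons_self
    have hl := ih (fun x hx => h x (List.mem_cons_of_mem _ hx))
    cases hfa : g a <;> simp [hfa, ha, hl]

theorem pv_gpure_flat (req : List String) :
    ∀ (fuel : Nat) (f : String → List (List (String × List String))),
    pvRlen req f ≤ fuel →
    pvGpure req fuel f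
      = (List.range (pvRlen req f)).flatMap (fun r => req.filterMap (fun t => (f t)[r]?)) := by
  intro fuel
  induction fuel with
  | zero =>
    intro f hf
    rw [Nat.le_zero.mp hf]
    rfl
  | succ n ih =>
    intro f hf
    show (if req.filterMap (fun t => (f t).head?) = [] then []
          else req.filterMap (fun t => (f t).head?) ++ pvGpure req n (fun t => (f t).drop 1))
        = _
    by_cases hl : req.filterMap (fun t => (f t).head?) = []
    · rw [if_pos hl]
      have hall : ∀ t ∈ req, f t = [] := by
        intro t ht
        have h0 := List.filterMap_eq_nil_iff.mp hl t ht
        simpa using h0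
      have hr : pvRlen req f = 0 :=
        Nat.le_zero.mp (pv_rlen_le req f 0 (fun t ht => by rw [hall t ht]; exact le_refl 0))
      rw [hr]
      rfl
    · rw [if_neg hl]
      obtain ⟨y, hy⟩ := List.exists_mem_of_ne_nil _ hl
      obtain ⟨t0, ht0, hh⟩ := List.mem_filterMap.mp hy
      have h1 : 1 ≤ pvRlen req f := by
        have hl0 : 1 ≤ (f t0).length := by
          cases hft : f t0 with
          | nil => rw [hft] at hh; simp at hh
          | cons a l => simp
        exact le_trans hl0 (pv_le_rlen req f t0 ht0)
      have h2 : pvRlen req (fun t => (f t).drop 1) ≤ n := by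
        rw [pv_rlen_drop]
        omega
      rw [ih _ h2, pv_rlen_drop]
      have hsplit : List.range (pvRlen req f) = 0 :: (List.range (pvRlen req f - 1)).map Nat.succ := by
        conv_lhs => rw [show pvRlen req f = (pvRlen req f - 1) + 1 by omega]
        exact List.range_succ_eq_map
      rw [hsplit, List.flatMap_cons, List.flatMap_map]
      congr 1
      · apply pv_filterMap_congr
        intro t _
        exact List.head?_eq_getElem?
      · have hfun : (fun (r : Nat) => req.filterMap (fun t => ((f t).drop 1)[r]?))
            = (fun (r : Nat) => req.filterMap (fun t => (f t)[r]?)) ∘ Nat.succ := by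
          funext r
          apply pv_filterMap_congr
          intro t _
          rw [List.getElem?_drop, Nat.add_comm]
        rw [hfun]
        rfl


-- ===== VERDICT (by name: the statement is the Claim_ definition above) =====
theorem rank_and_balance_spec : Claim_equal_rank_and_balance := by
  intro cands req k _
  show rank_and_balance cands req k = rank_and_balance_alt cands req k
  by_cases hreq : req = []
  · simp only [rank_and_balance, rank_and_balance_alt, if_pos hreq]
  · simp only [rank_and_balance, rank_and_balance_alt, if_neg hreq]
    by_cases hk : k ≤ 0
    · rw [if_pos hk]
      exact pv_drain_stop _ _ _ _ _ (by simp; omega)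
    · rw [if_neg hk]
      have hkpos : 0 < k := not_le.mp hk
      rw [pv_drain_take k req _ _ [] (by simp; omega)]
      have hbA : ∀ t, (pvFill cands req (pvInitBuckets req)).getD t []
          = pvRep (req.count t) (pvMatch cands t) := by
        intro t
        rw [pv_getD_fill, pv_getD_init]
        simp
      rw [pv_G_pure req _ (fun t => pvMatch cands t) _ hbA]
      have hRle : pvRlen req (fun t => pvMatch cands t) ≤ cands.length * req.length + 1 := by
        have h1 : pvRlen req (fun t => pvMatch cands t) ≤ cands.length :=
          pv_rlen_le req _ cands.length
            (fun t _ => by simpa [pvMatch] using List.length_filter_le _ cands)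
        have h2 : 1 ≤ req.length := List.length_pos_of_ne_nil hreq
        have h3 : cands.length * 1 ≤ cands.length * req.length :=
          Nat.mul_le_mul_left _ h2
        omega
      rw [pv_gpure_flat req _ _ hRle]
      have hrounds : req.foldl (fun m t => max m ((pvBucketsB cands req).getD t []).length) 0
          = pvRlen req (fun t => pvMatch cands t) := by
        unfold pvRlen
        apply PySem.List.foldl_congr_mem
        intro acc t ht
        rw [pv_getD_bucketsB cands req t ht]
      have hrow : ∀ r : Nat, req.filterMap (fun t => ((pvBucketsB cands req).getD t [])[r]?)
          = req.filterMap (fun t => (pvMatch cands t)[r]?) := by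
        intro r
        apply pv_filterMap_congr
        intro t ht
        rw [pv_getD_bucketsB cands req t ht]
      rw [PySem.List.slice_to _ (le_of_lt hkpos), hrounds, funext hrow]
      simp
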